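-- pv_equiv track=rewrite | github.com/Regcent/AoC_2024 | Day5/aoc_5.py | part_1
-- ===== SOURCE A (Python) =====
-- def part_1(rules: dict, updates: list) -> dict:
--     result = {"ok": [], "nok": []}
--     for update in updates:
--         seen = []
--         okay = True
--         for page in update:
--             if page in rules:
--                 for other in seen:
--                     if other in rules[page]:
--                         okay = False
--                         break
--                 if not okay:
--                     break
--             seen.append(page)
--         if okay:
--             result["ok"].append(update)
--         else:
--             result["nok"].append(update)
--     return result
-- ===== SOURCE B (Python) =====
-- def part_1(rules: dict, updates: list) -> dict:
--     inv = {}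
--     for p, afters in rules.items():
--         for q in afters:
--             inv.setdefault(q, set()).add(p)
--     empty = set()
--     result = {"ok": [], "nok": []}
--     for update in updates:
--         uset = set(update)
--         banned = set()
--         okay = True
--         for page in update:
--             if page in banned:
--                 okay = False
--                 break
--             banned |= inv.get(page, empty) & uset
--         result["ok" if okay else "nok"].append(update)
--     return result
-- ===== Notes on version B (the rewrite author's own statement) =====
-- stated objective: alternative
-- what changed: B precomputes once an inverse index inv (page q -> set of pages p with q in rules[p]) and classifies each update in a single forward pass with a running banned set (inv entries intersected with the update's own page set), replacing A's per-page inner scan over the seen list against rules[page].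
import Mathlib
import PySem

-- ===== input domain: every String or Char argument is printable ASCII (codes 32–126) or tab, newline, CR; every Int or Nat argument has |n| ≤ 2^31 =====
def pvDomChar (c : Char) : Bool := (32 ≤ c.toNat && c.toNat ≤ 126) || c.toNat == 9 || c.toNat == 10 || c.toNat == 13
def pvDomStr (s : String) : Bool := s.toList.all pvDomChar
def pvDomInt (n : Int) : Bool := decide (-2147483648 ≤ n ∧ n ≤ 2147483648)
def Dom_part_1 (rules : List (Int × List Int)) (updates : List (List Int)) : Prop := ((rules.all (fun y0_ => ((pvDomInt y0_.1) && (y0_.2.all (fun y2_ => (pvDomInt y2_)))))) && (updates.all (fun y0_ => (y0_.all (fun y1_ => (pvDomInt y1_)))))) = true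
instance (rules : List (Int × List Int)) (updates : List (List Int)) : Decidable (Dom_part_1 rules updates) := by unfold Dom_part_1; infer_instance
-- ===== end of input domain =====

-- B replaces A's per-page inner scan of `seen` against rules[page] by a precomputed inverse
-- index and a running banned set (kept small by intersecting with the update's own pages);
-- one forward pass per update (objective: alternative).

-- ===== PORT A =====
-- inner `for other in seen: if other in rules[page]: okay = False; break` — returns the okay flag
def part_1_scan (ruleList : List Int) : List Int → Bool
  | [] => true
  | o :: rest => if ruleList.contains o then false else part_1_scan ruleList rest

-- `for page in update: if page in rules: …; seen.append(page)` with the early breaks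
def part_1_check (rules : PySem.Dict Int (List Int)) : List Int → List Int → Bool
  | _, [] => true
  | seen, page :: rest =>
    match rules.get? page with   -- `page in rules` then `rules[page]`
    | some lst =>
        if part_1_scan lst seen then part_1_check rules (seen ++ [page]) rest
        else false
    | none => part_1_check rules (seen ++ [page]) rest

def part_1 (rules : List (Int × List Int)) (updates : List (List Int)) : List (String × List (List Int)) :=
  (updates.foldl
    (fun res update =>
      if part_1_check (PySem.Dict.mk rules) [] update then
        res.modify "ok" [] (· ++ [update])      -- result["ok"].append(update)
      else
        res.modify "nok" [] (· ++ [update]))    -- result["nok"].append(update)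
    (PySem.Dict.mk [("ok", []), ("nok", [])])).items

-- ===== PORT B =====
-- inv.setdefault(q, set()).add(p) over all (p, afters) in rules.items()
def part_1_inv (rules : List (Int × List Int)) : PySem.Dict Int (PySem.Set Int) :=
  rules.foldl
    (fun d pr => pr.2.foldl (fun d q => d.modify q PySem.Set.empty (fun s => PySem.Set.add s pr.1)) d)
    PySem.Dict.empty

-- `for page in update: if page in banned: okay = False; break; banned |= inv.get(page, empty) & uset`
def part_1_go (inv : PySem.Dict Int (PySem.Set Int)) (uset : PySem.Set Int) : PySem.Set Int → List Int → Bool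
  | _, [] => true
  | banned, page :: rest =>
    if PySem.Set.contains banned page then false
    else part_1_go inv uset
      (PySem.Set.union banned (PySem.Set.inter (inv.getD page PySem.Set.empty) uset)) rest

def part_1_alt (rules : List (Int × List Int)) (updates : List (List Int)) : List (String × List (List Int)) :=
  let inv := part_1_inv rules
  (updates.foldl
    (fun res update =>
      if part_1_go inv (PySem.Set.ofList update) PySem.Set.empty update then
        res.modify "ok" [] (· ++ [update])
      else
        res.modify "nok" [] (· ++ [update]))
    (PySem.Dict.mk [("ok", []), ("nok", [])])).items

-- ===== PRECONDITION & SPEC =====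
-- Pre_ states the dict representation invariant: `rules` stands for a Python dict, whose key list
-- is necessarily duplicate-free; an association list with a repeated key corresponds to no Python input.
def Pre_part_1 (rules : List (Int × List Int)) (updates : List (List Int)) : Prop :=
  (rules.map Prod.fst).Nodup

instance (rules : List (Int × List Int)) (updates : List (List Int)) : Decidable (Pre_part_1 rules updates) := by
  unfold Pre_part_1; infer_instance

def pvWitness_part_1 : (List (Int × List Int)) × List (List Int) :=
  ([(47, [53, 29]), (97, [13])], [[75, 47, 61, 53], [53, 47], [97, 13]])

def Spec_part_1 (rules : List (Int × List Int)) (updates : List (List Int)) (out : List (String × List (List Int))) : Prop := out = part_1_alt rules updates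
instance (rules : List (Int × List Int)) (updates : List (List Int)) (out : List (String × List (List Int))) : Decidable (Spec_part_1 rules updates out) := by unfold Spec_part_1; infer_instance

-- ===== CLAIM (what is proved, stated in full; the proofs are below) =====
def Claim_equal_part_1 : Prop := ∀ (rules : List (Int × List Int)) (updates : List (List Int)), Dom_part_1 rules updates → Pre_part_1 rules updates → Spec_part_1 rules updates (part_1 rules updates)

-- ===== LEMMAS AND PROOFS =====

-- A's inner scan succeeds iff nothing in `seen` lies in the rule list
lemma part_1_scan_iff (ruleList : List Int) (seen : List Int) :
    part_1_scan ruleList seen = true ↔ ∀ o ∈ seen, o ∉ ruleList := by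
  induction seen with
  | nil => simp [part_1_scan]
  | cons o rest ih =>
    by_cases h : o ∈ ruleList <;> simp [part_1_scan, h, ih]

-- membership in the inner fold of part_1_inv
lemma part_1_inv_inner (afters : List Int) (p0 : Int) (d : PySem.Dict Int (PySem.Set Int))
    (q p : Int) :
    p ∈ (afters.foldl (fun d q => d.modify q PySem.Set.empty (fun s => PySem.Set.add s p0)) d).getD q PySem.Set.empty
      ↔ p ∈ d.getD q PySem.Set.empty ∨ (p = p0 ∧ q ∈ afters) := by
  induction afters generalizing d with
  | nil => simp
  | cons a rest ih =>
    simp only [List.foldl_cons, ih, PySem.Dict.getD_modify]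
    by_cases hq : q = a <;> simp [hq, PySem.Set.mem_add] <;> tauto

-- characterisation of the inverse index: p ∈ inv[q] ↔ some rule entry (p, lst) has q ∈ lst
lemma part_1_inv_mem (rules : List (Int × List Int)) (q p : Int) :
    p ∈ (part_1_inv rules).getD q PySem.Set.empty
      ↔ ∃ lst, (p, lst) ∈ rules ∧ q ∈ lst := by
  have main : ∀ (l : List (Int × List Int)) (d : PySem.Dict Int (PySem.Set Int)),
      p ∈ (l.foldl (fun d pr => pr.2.foldl (fun d q => d.modify q PySem.Set.empty (fun s => PySem.Set.add s pr.1)) d) d).getD q PySem.Set.empty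
        ↔ p ∈ d.getD q PySem.Set.empty ∨ ∃ lst, (p, lst) ∈ l ∧ q ∈ lst := by
    intro l
    induction l with
    | nil => simp
    | cons pr rest ih =>
      intro d
      rcases pr with ⟨p1, afters⟩
      simp only [List.foldl_cons, ih, part_1_inv_inner, List.mem_cons]
      constructor
      · rintro (⟨h | ⟨rfl, hq⟩⟩ | ⟨lst, hl, hq⟩)
        · exact Or.inl h
        · exact Or.inr ⟨afters, Or.inl rfl, hq⟩
        · exact Or.inr ⟨lst, Or.inr hl, hq⟩
      · rintro (h | ⟨lst, (heq | hl), hq⟩)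
        · exact Or.inl (Or.inl h)
        · cases heq; exact Or.inl (Or.inr ⟨rfl, hq⟩)
        · exact Or.inr ⟨lst, hl, hq⟩
  simpa [part_1_inv] using main rules PySem.Dict.empty

-- main per-update lemma: A's check with `seen` equals B's pass over the rest of the update
-- `update0`, with any `banned` whose membership is exactly "page of update0 with some earlier
-- page o having a rule entry (p, lst), o ∈ lst"
lemma part_1_check_eq_go (rules : List (Int × List Int))
    (hN : (rules.map Prod.fst).Nodup) (update0 : List Int) (rest : List Int) :
    ∀ (seen : List Int) (banned : PySem.Set Int),
      (∀ x ∈ rest, x ∈ update0) →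
      (∀ p, p ∈ banned ↔ p ∈ update0 ∧ ∃ o ∈ seen, ∃ lst, (p, lst) ∈ rules ∧ o ∈ lst) →
      part_1_check (PySem.Dict.mk rules) seen rest
        = part_1_go (part_1_inv rules) (PySem.Set.ofList update0) banned rest := by
  have hkeys : (PySem.Dict.mk rules).keys.Nodup := by
    simpa [PySem.Dict.keys_mk] using hN
  have hmem : ∀ p lst, (PySem.Dict.mk rules).get? p = some lst ↔ (p, lst) ∈ rules := by
    intro p lst
    simpa using PySem.Dict.get?_eq_some_iff_mem_items (d := PySem.Dict.mk rules) (k := p) (v := lst) hkeys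
  induction rest with
  | nil => intro seen banned _ _; rfl
  | cons page rest ih =>
    intro seen banned hsub hb
    have hpage : page ∈ update0 := hsub page (List.mem_cons_self)
    have hsub' : ∀ x ∈ rest, x ∈ update0 := fun x hx => hsub x (List.mem_cons_of_mem _ hx)
    have hext : ∀ p,
        p ∈ PySem.Set.union banned
              (PySem.Set.inter ((part_1_inv rules).getD page PySem.Set.empty) (PySem.Set.ofList update0))
          ↔ p ∈ update0 ∧ ∃ o ∈ seen ++ [page], ∃ lst, (p, lst) ∈ rules ∧ o ∈ lst := by
      intro p
      simp only [PySem.Set.mem_union, PySem.Set.mem_inter, PySem.Set.mem_ofList, hb p,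
        part_1_inv_mem, List.mem_append, List.mem_singleton]
      constructor
      · rintro (⟨hu, o, ho, w⟩ | ⟨⟨lst, hl, hq⟩, hu⟩)
        · exact ⟨hu, o, Or.inl ho, w⟩
        · exact ⟨hu, page, Or.inr rfl, lst, hl, hq⟩
      · rintro ⟨hu, o, ho | rfl, w⟩
        · exact Or.inl ⟨hu, o, ho, w⟩
        · exact Or.inr ⟨w, hu⟩
    cases hget : (PySem.Dict.mk rules).get? page with
    | none =>
      have hno : ∀ lst, (page, lst) ∉ rules := by
        intro lst hl
        have h1 := (hmem page lst).2 hl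
        rw [hget] at h1
        simp at h1
      have hc : PySem.Set.contains banned page = false := by
        rw [Bool.eq_false_iff]
        intro hc
        rcases ((hb page).1 ((PySem.Set.contains_iff banned page).1 hc)).2 with ⟨o, _, lst, hl, _⟩
        exact hno lst hl
      simp only [part_1_check, hget, part_1_go, hc, Bool.false_eq_true, if_false]
      exact ih (seen ++ [page]) _ hsub' hext
    | some lst =>
      have huni : ∀ lst', (page, lst') ∈ rules ↔ lst' = lst := by
        intro lst'
        constructor
        · intro h
          have h1 := (hmem page lst').2 h
          rw [hget] at h1
          exact (Option.some_inj.1 h1).symm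
        · intro he; rw [he]; exact (hmem page lst).1 hget
      have hiff : (∃ o ∈ seen, ∃ l', (page, l') ∈ rules ∧ o ∈ l') ↔ ¬ (part_1_scan lst seen = true) := by
        rw [part_1_scan_iff]
        constructor
        · rintro ⟨o, ho, l', hl', hol⟩ hall
          have heq := (huni l').1 hl'
          subst heq
          exact hall o ho hol
        · intro h
          push_neg at h
          rcases h with ⟨o, ho, hol⟩
          exact ⟨o, ho, lst, (huni lst).2 rfl, hol⟩
      by_cases hscan : part_1_scan lst seen = true
      · have hc : PySem.Set.contains banned page = false := by
          rw [Bool.eq_false_iff]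
          intro hc
          exact hiff.1 ((hb page).1 ((PySem.Set.contains_iff banned page).1 hc)).2 hscan
        simp only [part_1_check, hget, part_1_go, hscan, if_true, hc, Bool.false_eq_true, if_false]
        exact ih (seen ++ [page]) _ hsub' hext
      · have hc : PySem.Set.contains banned page = true := by
          exact (PySem.Set.contains_iff banned page).2 ((hb page).2 ⟨hpage, hiff.2 hscan⟩)
        simp only [part_1_check, hget, part_1_go, hscan, if_false, hc, if_true,
          Bool.false_eq_true]
    -- note: in the last case both sides are `false`

-- the two classifiers agree from the empty start states
lemma part_1_classify_eq (rules : List (Int × List Int))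
    (hN : (rules.map Prod.fst).Nodup) (update : List Int) :
    part_1_check (PySem.Dict.mk rules) [] update
      = part_1_go (part_1_inv rules) (PySem.Set.ofList update) PySem.Set.empty update := by
  apply part_1_check_eq_go rules hN update update [] PySem.Set.empty (fun x hx => hx)
  intro p
  simp [PySem.Set.empty]

-- folding the two classifiers over any update list from any accumulator gives the same result
lemma part_1_fold_eq (rules : List (Int × List Int))
    (hN : (rules.map Prod.fst).Nodup) :
    ∀ (l : List (List Int)) (res : PySem.Dict String (List (List Int))),
      l.foldl
        (fun res update =>
          if part_1_check (PySem.Dict.mk rules) [] update then res.modify "ok" [] (· ++ [update])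
          else res.modify "nok" [] (· ++ [update])) res
      = l.foldl
        (fun res update =>
          if part_1_go (part_1_inv rules) (PySem.Set.ofList update) PySem.Set.empty update then res.modify "ok" [] (· ++ [update])
          else res.modify "nok" [] (· ++ [update])) res := by
  intro l
  induction l with
  | nil => intro res; rfl
  | cons u rest ih =>
    intro res
    simp only [List.foldl_cons, part_1_classify_eq rules hN u]
    exact ih _

-- ===== VERDICT (by name: the statement is the Claim_ definition above) =====
theorem part_1_spec : Claim_equal_part_1 := by
  intro rules updates _ hpre
  unfold Spec_part_1 part_1 part_1_alt
  simp only [part_1_fold_eq rules hpre]
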